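-- pv_equiv track=rewrite | github.com/azwdevops/courzehub-coding-challenges | python/set8.py | checkgraph
-- ===== SOURCE A (Python) =====
-- def checkgraph(edges, n, m):
--
--     # Write your code here
--     # Return a boolean variable 'True' or 'False' denoting the answer
--     adj_list = [[] for _ in range(n)]
--
--     for start, end in edges:
--         adj_list[start].append(end)
--         adj_list[end].append(start)
--
--     visited = set()
--
--     def dfs(node, parent):
--         visited.add(node)
--
--         for neighbor in adj_list[node]:
--             if neighbor not in visited:
--                 if not dfs(neighbor, node):
--                     return False
--             elif neighbor != parent:
--                 return False
--
--         return True
--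
--     if not dfs(0, -1):
--         return False
--
--     return len(visited) == n
-- ===== SOURCE B (Python) =====
-- def checkgraph(edges, n, m):
--     # Iterative DFS with an explicit stack instead of A's recursive closure.
--     adj = [[] for _ in range(n)]
--     for s, e in edges:
--         adj[s].append(e)
--         adj[e].append(s)
--
--     stack = [(0, -1, adj[0])]
--     visited = {0}
--     while stack:
--         node, parent, rest = stack.pop()
--         if not rest:
--             continue
--         nb, rest = rest[0], rest[1:]
--         stack.append((node, parent, rest))
--         if nb not in visited:
--             visited.add(nb)
--             stack.append((nb, node, adj[nb]))
--         elif nb != parent: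
--             return False
--     return len(visited) == n
-- ===== Notes on version B (the rewrite author's own statement) =====
-- stated objective: alternative
-- what changed: A's recursive DFS closure is replaced by an iterative depth-first traversal driven by an explicit stack of (node, parent, remaining-neighbours) frames, so no recursion (and no Python recursion-depth limit) is involved.
import Mathlib
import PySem

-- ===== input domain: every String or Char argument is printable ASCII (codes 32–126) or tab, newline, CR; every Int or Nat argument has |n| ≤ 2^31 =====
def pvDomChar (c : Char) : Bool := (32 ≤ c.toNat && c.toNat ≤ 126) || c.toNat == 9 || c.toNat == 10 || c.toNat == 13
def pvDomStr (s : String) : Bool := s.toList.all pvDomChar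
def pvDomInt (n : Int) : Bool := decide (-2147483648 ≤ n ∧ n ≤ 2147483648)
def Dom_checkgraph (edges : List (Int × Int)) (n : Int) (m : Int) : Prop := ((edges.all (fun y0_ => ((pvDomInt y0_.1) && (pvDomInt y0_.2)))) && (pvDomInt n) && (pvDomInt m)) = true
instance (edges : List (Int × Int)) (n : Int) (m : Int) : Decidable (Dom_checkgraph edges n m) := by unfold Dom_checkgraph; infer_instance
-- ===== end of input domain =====

-- B replaces A's recursive DFS closure by an iterative depth-first traversal driven by an
-- explicit stack of (node, parent, remaining-neighbours) frames ("alternative" objective).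

-- ===== PORT A =====
-- adj_list[i].append(x)  (negative i wraps like Python; none = IndexError)
def pvAppendAt (adj : List (List Int)) (i : Int) (x : Int) : Option (List (List Int)) :=
  match PySem.List.pyGet? adj i with
  | none => none
  | some l => PySem.List.pySet? adj i (l ++ [x])

-- the 'for start, end in edges' adjacency-building loop (shared verbatim by A and B)
def pvBuildAdj : List (Int × Int) → List (List Int) → Option (List (List Int))
  | [], adj => some adj
  | (s, e) :: rest, adj =>
    match pvAppendAt adj s e with
    | none => none
    | some adj1 =>
      match pvAppendAt adj1 e s with
      | none => none
      | some adj2 => pvBuildAdj rest adj2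

mutual
-- A's recursive dfs(node, parent); fuel only makes the recursion total (none = out of fuel / IndexError)
def pvDfs : Nat → List (List Int) → Int → Int → PySem.Set Int → Option (Bool × PySem.Set Int)
  | 0, _, _, _, _ => none
  | f + 1, adj, node, parent, visited =>
    let v1 := PySem.Set.add visited node
    match PySem.List.pyGet? adj node with
    | none => none
    | some nbrs => pvDfsLoop f adj node parent nbrs v1
termination_by f _ _ _ _ => (f, 0)

-- the 'for neighbor in adj_list[node]' loop inside dfs
def pvDfsLoop : Nat → List (List Int) → Int → Int → List Int → PySem.Set Int → Option (Bool × PySem.Set Int)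
  | _, _, _, _, [], visited => some (true, visited)
  | f, adj, node, parent, nb :: rest, visited =>
    if PySem.Set.contains visited nb then
      if nb ≠ parent then some (false, visited)
      else pvDfsLoop f adj node parent rest visited
    else
      match pvDfs f adj nb node visited with
      | none => none
      | some (false, v') => some (false, v')
      | some (true, v') => pvDfsLoop f adj node parent rest v'
termination_by f _ _ _ l _ => (f, l.length + 1)
end

def checkgraph (edges : List (Int × Int)) (n : Int) (m : Int) : Bool :=
  let adj0 : List (List Int) := (PySem.List.pyRange 0 n 1).map (fun _ => [])
  match pvBuildAdj edges adj0 with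
  | none => false
  | some adj =>
    match pvDfs (2 * adj.length + 2) adj 0 (-1) PySem.Set.empty with
    | none => false
    | some (b, visited) =>
      if b then decide ((visited.length : Int) = n) else false

-- ===== PORT B =====
-- one while-loop iteration per fuel unit: pop a frame, consume one neighbour of it
def pvRun : Nat → Int → List (List Int) → List (Int × Int × List Int) → PySem.Set Int → Option Bool
  | 0, _, _, _, _ => none
  | _ + 1, n, _, [], visited => some (decide ((visited.length : Int) = n))
  | f + 1, n, adj, (node, parent, rest) :: stk, visited =>
    match rest with
    | [] => pvRun f n adj stk visited
    | nb :: rest' =>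
      if PySem.Set.contains visited nb then
        if nb = parent then pvRun f n adj ((node, parent, rest') :: stk) visited
        else some false
      else
        match PySem.List.pyGet? adj nb with
        | none => none
        | some lnb =>
          pvRun f n adj ((nb, node, lnb) :: (node, parent, rest') :: stk)
            (PySem.Set.add visited nb)

def checkgraph_alt (edges : List (Int × Int)) (n : Int) (m : Int) : Bool :=
  let adj0 : List (List Int) := (PySem.List.pyRange 0 n 1).map (fun _ => [])
  match pvBuildAdj edges adj0 with
  | none => false
  | some adj =>
    match PySem.List.pyGet? adj 0 with
    | none => false
    | some l0 =>
      ((pvRun ((2 * adj.length + 2) * (2 * edges.length + 2) + 8) n adj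
          [(0, -1, l0)] (PySem.Set.add PySem.Set.empty 0)).getD false)

-- ===== PRECONDITION & SPEC =====
-- Pre_ excludes exactly the inputs on which the Python A raises IndexError: n < 1 (dfs(0,…)
-- indexes adj_list[0]) or an edge endpoint outside [-n, n) (adjacency build indexes it).
def Pre_checkgraph (edges : List (Int × Int)) (n : Int) (m : Int) : Prop :=
  1 ≤ n ∧ ∀ p ∈ edges, (-n ≤ p.1 ∧ p.1 < n) ∧ (-n ≤ p.2 ∧ p.2 < n)
instance (edges : List (Int × Int)) (n : Int) (m : Int) : Decidable (Pre_checkgraph edges n m) := by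
  unfold Pre_checkgraph; infer_instance

def pvWitness_checkgraph : (List (Int × Int)) × Int × Int := ([(0, 1), (1, 2)], 3, 2)

def Spec_checkgraph (edges : List (Int × Int)) (n : Int) (m : Int) (out : Bool) : Prop := out = checkgraph_alt edges n m
instance (edges : List (Int × Int)) (n : Int) (m : Int) (out : Bool) : Decidable (Spec_checkgraph edges n m out) := by unfold Spec_checkgraph; infer_instance

-- ===== CLAIM (what is proved, stated in full; the proofs are below) =====
def Claim_equal_checkgraph : Prop := ∀ (edges : List (Int × Int)) (n : Int) (m : Int), Dom_checkgraph edges n m → Pre_checkgraph edges n m → Spec_checkgraph edges n m (checkgraph edges n m)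

-- ===== LEMMAS AND PROOFS =====

-- the graph-theoretic potential: total remaining adjacency weight of unvisited labels
def pvW (adj : List (List Int)) (x : Int) : Nat := (PySem.List.pyGetD adj x []).length + 1
noncomputable def pvS (adj : List (List Int)) (v : List Int) : Nat :=
  (Finset.Ico (-(adj.length : Int)) (adj.length : Int)).sum
    (fun x => if x ∈ v then 0 else pvW adj x)

lemma pvGet_some_of_inRange {α : Type} (xs : List α) (i : Int)
    (h : PySem.Raise.InRange xs.length i) : ∃ y, PySem.List.pyGet? xs i = some y := by
  cases hg : PySem.List.pyGet? xs i with
  | none => exact absurd h ((PySem.List.pyGet?_eq_none_iff xs i).mp hg)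
  | some y => exact ⟨y, rfl⟩

lemma pvInRange_of_get_some {α : Type} (xs : List α) (i : Int) (y : α)
    (h : PySem.List.pyGet? xs i = some y) : PySem.Raise.InRange xs.length i := by
  by_contra hc
  rw [← PySem.List.pyGet?_eq_none_iff] at hc
  simp [hc] at h

lemma pvGetD_eq_of_get_some (adj : List (List Int)) (i : Int) (l : List Int)
    (h : PySem.List.pyGet? adj i = some l) : PySem.List.pyGetD adj i [] = l := by
  simp [PySem.List.pyGetD, h]

-- removing one unvisited in-range label nb from the potential
lemma pvS_add (adj : List (List Int)) (v : PySem.Set Int) (nb : Int) (lnb : List Int)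
    (hget : PySem.List.pyGet? adj nb = some lnb) (hmem : nb ∉ v) :
    pvS adj v = pvS adj (PySem.Set.add v nb) + (lnb.length + 1) := by
  have hIR : PySem.Raise.InRange adj.length nb := pvInRange_of_get_some adj nb lnb hget
  have hico : nb ∈ Finset.Ico (-(adj.length : Int)) (adj.length : Int) := by
    simp only [Finset.mem_Ico]
    exact ⟨hIR.1, hIR.2⟩
  have hw : pvW adj nb = lnb.length + 1 := by
    unfold pvW
    rw [pvGetD_eq_of_get_some adj nb lnb hget]
  rw [PySem.Set.add_of_not_mem hmem]
  unfold pvS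
  rw [← Finset.add_sum_erase _ _ hico, ← Finset.add_sum_erase _ _ hico]
  have hcongr : ∀ x ∈ (Finset.Ico (-(adj.length : Int)) (adj.length : Int)).erase nb,
      (if x ∈ v then 0 else pvW adj x) = (if x ∈ v ++ [nb] then 0 else pvW adj x) := by
    intro x hx
    have hxne : x ≠ nb := Finset.ne_of_mem_erase hx
    simp [List.mem_append, hxne]
  rw [Finset.sum_congr rfl hcongr]
  have h1 : (if nb ∈ v then 0 else pvW adj nb) = pvW adj nb := by simp [hmem]
  have h2 : (if nb ∈ v ++ [nb] then 0 else pvW adj nb) = 0 := by simp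
  rw [h1, h2, hw]
  omega

-- nodup list of in-range labels has at most 2·|adj| elements
lemma pvLen_le (adj : List (List Int)) (v : List Int) (hnd : v.Nodup)
    (hIR : ∀ x ∈ v, PySem.Raise.InRange adj.length x) :
    v.length ≤ 2 * adj.length := by
  have h1 : v.toFinset ⊆ Finset.Ico (-(adj.length : Int)) (adj.length : Int) := by
    intro x hx
    rw [List.mem_toFinset] at hx
    have := hIR x hx
    simp only [Finset.mem_Ico]
    exact ⟨this.1, this.2⟩
  have h2 := Finset.card_le_card h1
  rw [List.toFinset_card_of_nodup hnd, Int.card_Ico] at h2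
  omega

-- ===== the simulation: B's stack machine runs A's dfs loop step for step =====
lemma pvMain (adj : List (List Int)) (n : Int) :
    ∀ (fA : Nat) (rest : List Int) (node parent : Int) (v : PySem.Set Int)
      (res : Bool × PySem.Set Int),
      pvDfsLoop fA adj node parent rest v = some res →
      ∃ d, d + pvS adj res.2 ≤ rest.length + 1 + pvS adj v ∧
        (res.1 = true → ∀ stk f,
          pvRun (f + d) n adj ((node, parent, rest) :: stk) v = pvRun f n adj stk res.2) ∧
        (res.1 = false → ∀ stk f,
          pvRun (f + d + 1) n adj ((node, parent, rest) :: stk) v = some false) := by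
  intro fA
  induction fA using Nat.strong_induction_on with
  | _ fA ihf =>
    intro rest
    induction rest with
    | nil =>
      intro node parent v res h
      simp only [pvDfsLoop] at h
      obtain rfl : (true, v) = res := Option.some.inj h
      refine ⟨1, by show 1 + pvS adj v ≤ [].length + 1 + pvS adj v; omega, ?_, ?_⟩
      · intro _ stk f
        simp [pvRun]
      · intro hfalse
        simp at hfalse
    | cons nb rest' ihr =>
      intro node parent v res h
      by_cases hc : nb ∈ v
      · have hct : PySem.Set.contains v nb = true := (PySem.Set.contains_iff v nb).mpr hc
        by_cases hp : nb = parent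
        · -- visited neighbour equal to parent: skip it
          have h' : pvDfsLoop fA adj node parent rest' v = some res := by
            subst hp
            simpa [pvDfsLoop, hc] using h
          obtain ⟨d', hb, ht, hf⟩ := ihr node parent v res h'
          refine ⟨d' + 1, by simp only [List.length_cons]; omega, ?_, ?_⟩
          · intro htrue stk f
            have harith : f + (d' + 1) = (f + d') + 1 := by omega
            rw [harith]
            have hstep : pvRun ((f + d') + 1) n adj ((node, parent, nb :: rest') :: stk) v
                = pvRun (f + d') n adj ((node, parent, rest') :: stk) v := by
              subst hp
              simp [pvRun, hc]
            rw [hstep]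
            exact ht htrue stk f
          · intro hfalse stk f
            have harith : f + (d' + 1) + 1 = ((f + d' + 1)) + 1 := by omega
            rw [harith]
            have hstep : pvRun ((f + d' + 1) + 1) n adj ((node, parent, nb :: rest') :: stk) v
                = pvRun (f + d' + 1) n adj ((node, parent, rest') :: stk) v := by
              subst hp
              simp [pvRun, hc]
            rw [hstep]
            exact hf hfalse stk f
        · -- visited neighbour different from parent: cycle, return False
          have hres : some ((false : Bool), v) = some res := by
            simpa [pvDfsLoop, hc, hp] using h
          obtain rfl : ((false : Bool), v) = res := Option.some.inj hres
          refine ⟨0, by simp only [List.length_cons]; omega, ?_, ?_⟩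
          · intro htrue
            simp at htrue
          · intro _ stk f
            simp [pvRun, hct, hp, hc]
      · -- unvisited neighbour: recurse
        have hcf : PySem.Set.contains v nb = false := by
          rw [← Bool.not_eq_true]
          intro hcon
          exact hc ((PySem.Set.contains_iff v nb).mp hcon)
        cases fA with
        | zero =>
          exfalso
          simp [pvDfsLoop, hc, pvDfs] at h
        | succ f =>
          cases hg : PySem.List.pyGet? adj nb with
          | none =>
            exfalso
            simp [pvDfsLoop, hc, pvDfs, hg] at h
          | some lnb =>
            cases hchild : pvDfsLoop f adj nb node lnb (v ++ [nb]) with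
            | none =>
              exfalso
              simp [pvDfsLoop, hc, pvDfs, hg, hchild] at h
            | some cres =>
              obtain ⟨bc, vc⟩ := cres
              obtain ⟨dc, cb, ct, cf⟩ := ihf f (by omega) lnb nb node
                (v ++ [nb]) (bc, vc) hchild
              have hSadd : pvS adj v = pvS adj (v ++ [nb]) + (lnb.length + 1) := by
                have := pvS_add adj v nb lnb hg hc
                rwa [PySem.Set.add_of_not_mem hc] at this
              cases bc with
              | false =>
                have hres : some ((false : Bool), vc) = some res := by
                  simpa [pvDfsLoop, hc, pvDfs, hg, hchild] using h
                obtain rfl : ((false : Bool), vc) = res := Option.some.inj hres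
                refine ⟨dc + 1, ?_, ?_, ?_⟩
                · simp only [List.length_cons]
                  simp only at cb
                  omega
                · intro htrue
                  simp at htrue
                · intro _ stk fz
                  have harith : fz + (dc + 1) + 1 = ((fz + dc + 1)) + 1 := by omega
                  rw [harith]
                  have hstep : pvRun ((fz + dc + 1) + 1) n adj
                      ((node, parent, nb :: rest') :: stk) v
                      = pvRun (fz + dc + 1) n adj
                        ((nb, node, lnb) :: (node, parent, rest') :: stk)
                        (v ++ [nb]) := by
                    simp [pvRun, hcf, hc, hg]
                  rw [hstep]
                  exact cf rfl ((node, parent, rest') :: stk) fz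
              | true =>
                have h2 : pvDfsLoop (f + 1) adj node parent rest' vc = some res := by
                  simpa [pvDfsLoop, hc, pvDfs, hg, hchild] using h
                obtain ⟨dr, rb, rt, rf⟩ := ihr node parent vc res h2
                refine ⟨1 + dc + dr, ?_, ?_, ?_⟩
                · simp only [List.length_cons]
                  simp only at cb
                  omega
                · intro htrue stk fz
                  have harith : fz + (1 + dc + dr) = (((fz + dr) + dc) + 1) := by omega
                  rw [harith]
                  have hstep : pvRun (((fz + dr) + dc) + 1) n adj
                      ((node, parent, nb :: rest') :: stk) v
                      = pvRun ((fz + dr) + dc) n adj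
                        ((nb, node, lnb) :: (node, parent, rest') :: stk)
                        (v ++ [nb]) := by
                    simp [pvRun, hcf, hc, hg]
                  rw [hstep, ct rfl ((node, parent, rest') :: stk) (fz + dr)]
                  exact rt htrue stk fz
                · intro hfalse stk fz
                  have harith : fz + (1 + dc + dr) + 1 = (((fz + dr + 1) + dc) + 1) := by omega
                  rw [harith]
                  have hstep : pvRun (((fz + dr + 1) + dc) + 1) n adj
                      ((node, parent, nb :: rest') :: stk) v
                      = pvRun ((fz + dr + 1) + dc) n adj
                        ((nb, node, lnb) :: (node, parent, rest') :: stk)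
                        (v ++ [nb]) := by
                    simp [pvRun, hcf, hc, hg]
                  rw [hstep, ct rfl ((node, parent, rest') :: stk) (fz + dr + 1)]
                  exact rf hfalse stk fz

-- ===== fuel sufficiency for A's dfs =====
lemma pvSuff (adj : List (List Int))
    (Hadj : ∀ l ∈ adj, ∀ x ∈ l, PySem.Raise.InRange adj.length x) :
    ∀ (f : Nat) (node parent : Int) (v : PySem.Set Int),
      v.Nodup → (∀ x ∈ v, PySem.Raise.InRange adj.length x) →
      PySem.Raise.InRange adj.length node →
      2 * adj.length + 1 ≤ f + (PySem.Set.add v node).length →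
      ∃ b v', pvDfs f adj node parent v = some (b, v') ∧ v'.Nodup ∧
        (∀ x ∈ v', PySem.Raise.InRange adj.length x) ∧
        (PySem.Set.add v node).length ≤ v'.length := by
  intro f
  induction f with
  | zero =>
    intro node parent v hnd hIR hIRn hfuel
    exfalso
    have hnd1 : (PySem.Set.add v node).Nodup := PySem.Set.nodup_add v node hnd
    have hIR1 : ∀ x ∈ PySem.Set.add v node, PySem.Raise.InRange adj.length x := by
      intro x hx
      rcases (PySem.Set.mem_add v node x).mp hx with h | rfl
      · exact hIR x h
      · exact hIRn
    have := pvLen_le adj _ hnd1 hIR1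
    omega
  | succ f ih =>
    intro node parent v hnd hIR hIRn hfuel
    obtain ⟨nbrs, hget⟩ := pvGet_some_of_inRange adj node hIRn
    have hnd1 : (PySem.Set.add v node).Nodup := PySem.Set.nodup_add v node hnd
    have hIR1 : ∀ x ∈ PySem.Set.add v node, PySem.Raise.InRange adj.length x := by
      intro x hx
      rcases (PySem.Set.mem_add v node x).mp hx with h | rfl
      · exact hIR x h
      · exact hIRn
    have hnbrs : ∀ x ∈ nbrs, PySem.Raise.InRange adj.length x :=
      Hadj nbrs (PySem.List.mem_of_pyGet?_eq_some adj hget)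
    have loop : ∀ (rest : List Int), (∀ x ∈ rest, PySem.Raise.InRange adj.length x) →
        ∀ (vc : PySem.Set Int), vc.Nodup →
        (∀ x ∈ vc, PySem.Raise.InRange adj.length x) →
        2 * adj.length ≤ f + vc.length →
        ∃ b v', pvDfsLoop f adj node parent rest vc = some (b, v') ∧ v'.Nodup ∧
          (∀ x ∈ v', PySem.Raise.InRange adj.length x) ∧ vc.length ≤ v'.length := by
      intro rest
      induction rest with
      | nil =>
        intro _ vc hndc hIRc _
        exact ⟨true, vc, by simp [pvDfsLoop], hndc, hIRc, Nat.le_refl _⟩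
      | cons nb rest' ihr =>
        intro hR vc hndc hIRc hfc
        by_cases hc : nb ∈ vc
        · have hct : PySem.Set.contains vc nb = true := (PySem.Set.contains_iff vc nb).mpr hc
          by_cases hp : nb = parent
          · obtain ⟨b, v', hres, p1, p2, p3⟩ :=
              ihr (fun x hx => hR x (List.mem_cons_of_mem _ hx)) vc hndc hIRc hfc
            refine ⟨b, v', ?_, p1, p2, p3⟩
            subst hp
            simp [pvDfsLoop, hc, hres]
          · exact ⟨false, vc, by simp [pvDfsLoop, hct, hp, hc], hndc, hIRc, Nat.le_refl _⟩
        · have hcf : PySem.Set.contains vc nb = false := by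
            rw [← Bool.not_eq_true]
            intro hcon
            exact hc ((PySem.Set.contains_iff vc nb).mp hcon)
          have hlenadd : (PySem.Set.add vc nb).length = vc.length + 1 := by
            rw [PySem.Set.add_of_not_mem hc, List.length_append]
            rfl
          obtain ⟨b, v', hdfs, hnd', hIR', hle'⟩ := ih nb node vc hndc hIRc
            (hR nb List.mem_cons_self) (by omega)
          rw [hlenadd] at hle'
          cases b with
          | false =>
            refine ⟨false, v', ?_, hnd', hIR', by omega⟩
            simp [pvDfsLoop, hcf, hdfs, hc]
          | true =>
            obtain ⟨b2, v'', hres2, q1, q2, q3⟩ :=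
              ihr (fun x hx => hR x (List.mem_cons_of_mem _ hx)) v' hnd' hIR' (by omega)
            refine ⟨b2, v'', ?_, q1, q2, by omega⟩
            simp [pvDfsLoop, hcf, hdfs, hres2, hc]
    have hfc0 : 2 * adj.length ≤ f + (PySem.Set.add v node).length := by omega
    obtain ⟨b, v', hres, p1, p2, p3⟩ := loop nbrs hnbrs (PySem.Set.add v node) hnd1 hIR1 hfc0
    exact ⟨b, v', by simp [pvDfs, hget, hres], p1, p2, p3⟩

-- ===== adjacency building succeeds under Pre_ and keeps its invariants =====
lemma pvAppendAt_some (adj : List (List Int)) (i x : Int)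
    (h : PySem.Raise.InRange adj.length i) :
    ∃ adj', pvAppendAt adj i x = some adj' ∧ adj'.length = adj.length ∧
      ∀ l' ∈ adj', l' ∈ adj ∨ ∃ l ∈ adj, l' = l ++ [x] := by
  obtain ⟨l, hget⟩ := pvGet_some_of_inRange adj i h
  unfold pvAppendAt
  rw [hget]
  unfold PySem.List.pySet?
  cases hk : PySem.List.pyIdx? adj.length i with
  | none =>
    exfalso
    have : PySem.List.pyGet? adj i = none := by
      unfold PySem.List.pyGet?
      rw [hk]; rfl
    rw [hget] at this; exact Option.some_ne_none _ this
  | some k =>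
    refine ⟨adj.set k (l ++ [x]), rfl, List.length_set, ?_⟩
    intro l' hl'
    rcases List.mem_or_eq_of_mem_set hl' with h1 | h1
    · exact Or.inl h1
    · exact Or.inr ⟨l, PySem.List.mem_of_pyGet?_eq_some adj hget, h1⟩

lemma pvBuildAdj_some : ∀ (edges : List (Int × Int)) (adj : List (List Int)),
    (∀ p ∈ edges, PySem.Raise.InRange adj.length p.1 ∧ PySem.Raise.InRange adj.length p.2) →
    ∃ adj', pvBuildAdj edges adj = some adj' ∧ adj'.length = adj.length ∧
      (∀ l' ∈ adj', ∀ y ∈ l',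
        (∃ l ∈ adj, y ∈ l) ∨ ∃ p ∈ edges, y = p.1 ∨ y = p.2) ∧
      (∀ c : Nat, (∀ l ∈ adj, l.length ≤ c) →
        ∀ l' ∈ adj', l'.length ≤ c + 2 * edges.length) := by
  intro edges
  induction edges with
  | nil =>
    intro adj _
    exact ⟨adj, rfl, rfl, fun l' hl' y hy => Or.inl ⟨l', hl', hy⟩,
      fun c hc l' hl' => by have := hc l' hl'; omega⟩
  | cons p rest ih =>
    intro adj h
    obtain ⟨hs, he⟩ := h p (List.mem_cons_self)
    obtain ⟨adj1, ha1, hl1, hm1⟩ := pvAppendAt_some adj p.1 p.2 hs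
    obtain ⟨adj2, ha2, hl2, hm2⟩ := pvAppendAt_some adj1 p.2 p.1 (hl1 ▸ he)
    have hrest : ∀ q ∈ rest, PySem.Raise.InRange adj2.length q.1 ∧
        PySem.Raise.InRange adj2.length q.2 := by
      intro q hq
      rw [hl2, hl1]
      exact h q (List.mem_cons_of_mem _ hq)
    obtain ⟨adj', hb, hlen, hmem, hlens⟩ := ih adj2 hrest
    have hstep : pvBuildAdj (p :: rest) adj = some adj' := by
      show pvBuildAdj ((p.1, p.2) :: rest) adj = some adj'
      simp only [pvBuildAdj, ha1, ha2]
      exact hb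
    refine ⟨adj', hstep, by rw [hlen, hl2, hl1], ?_, ?_⟩
    · intro l' hl' y hy
      rcases hmem l' hl' y hy with ⟨l, hl, hyl⟩ | ⟨q, hq, hyq⟩
      · -- l ∈ adj2: unwind the two appends
        rcases hm2 l hl with h2 | ⟨l1, hl1m, rfl⟩
        · rcases hm1 l h2 with h3 | ⟨l0, hl0, rfl⟩
          · exact Or.inl ⟨l, h3, hyl⟩
          · rcases List.mem_append.mp hyl with hy0 | hy0
            · exact Or.inl ⟨l0, hl0, hy0⟩
            · exact Or.inr ⟨p, List.mem_cons_self, Or.inr (List.mem_singleton.mp hy0)⟩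
        · rcases List.mem_append.mp hyl with hy0 | hy0
          · rcases hm1 l1 hl1m with h3 | ⟨l0, hl0, rfl⟩
            · exact Or.inl ⟨l1, h3, hy0⟩
            · rcases List.mem_append.mp hy0 with hy1 | hy1
              · exact Or.inl ⟨l0, hl0, hy1⟩
              · exact Or.inr ⟨p, List.mem_cons_self, Or.inr (List.mem_singleton.mp hy1)⟩
          · exact Or.inr ⟨p, List.mem_cons_self, Or.inl (List.mem_singleton.mp hy0)⟩
      · exact Or.inr ⟨q, List.mem_cons_of_mem _ hq, hyq⟩
    · intro c hc l' hl'
      have hc1 : ∀ l ∈ adj1, l.length ≤ c + 1 := by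
        intro l hl
        rcases hm1 l hl with h1 | ⟨l0, hl0, rfl⟩
        · have := hc l h1; omega
        · have := hc l0 hl0; simp [List.length_append]; omega
      have hc2 : ∀ l ∈ adj2, l.length ≤ c + 2 := by
        intro l hl
        rcases hm2 l hl with h1 | ⟨l0, hl0, rfl⟩
        · have := hc1 l h1; omega
        · have := hc1 l0 hl0; simp [List.length_append]; omega
      have := hlens (c + 2) hc2 l' hl'
      simp only [List.length_cons]
      omega

-- potential is bounded by (#labels)·(max list length + 1)
lemma pvS_le (adj : List (List Int)) (v : List Int) (E : Nat)
    (hlen : ∀ l ∈ adj, l.length ≤ E) :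
    pvS adj v ≤ 2 * adj.length * (E + 1) := by
  unfold pvS
  have h1 : ∀ x ∈ Finset.Ico (-(adj.length : Int)) (adj.length : Int),
      (if x ∈ v then 0 else pvW adj x) ≤ E + 1 := by
    intro x _
    split
    · omega
    · unfold pvW
      cases hg : PySem.List.pyGet? adj x with
      | none => simp [PySem.List.pyGetD, hg]
      | some l =>
        rw [pvGetD_eq_of_get_some adj x l hg]
        have := hlen l (PySem.List.mem_of_pyGet?_eq_some adj hg)
        omega
  have h2 := Finset.sum_le_card_nsmul _ _ _ h1
  rw [Int.card_Ico] at h2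
  simp only [smul_eq_mul] at h2
  calc _ ≤ _ := h2
    _ ≤ 2 * adj.length * (E + 1) := by
      have : (((adj.length : Int)) - (-(adj.length : Int))).toNat = 2 * adj.length := by omega
      rw [this]

-- ===== VERDICT (by name: the statement is the Claim_ definition above) =====
lemma pvEmptyAdd0 : (PySem.Set.add PySem.Set.empty (0 : Int)).length = 1 := by
  decide

theorem checkgraph_spec : Claim_equal_checkgraph := by
  intro edges n m _ hpre
  unfold Spec_checkgraph
  obtain ⟨hn, hedges⟩ := hpre
  have hlen0 : ((PySem.List.pyRange 0 n 1).map (fun _ => ([] : List Int))).length = n.toNat := by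
    rw [List.length_map, PySem.List.length_pyRange_one]
    omega
  have hIRedges : ∀ p ∈ edges,
      PySem.Raise.InRange ((PySem.List.pyRange 0 n 1).map (fun _ => ([] : List Int))).length p.1 ∧
      PySem.Raise.InRange ((PySem.List.pyRange 0 n 1).map (fun _ => ([] : List Int))).length p.2 := by
    intro p hp
    obtain ⟨⟨h1, h2⟩, ⟨h3, h4⟩⟩ := hedges p hp
    rw [hlen0]
    unfold PySem.Raise.InRange
    omega
  obtain ⟨adj, hbuild, hlen, hmem, hlens⟩ := pvBuildAdj_some edges _ hIRedges
  have hNn : (adj.length : Int) = n := by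
    rw [hlen, hlen0]
    omega
  have Hadj : ∀ l ∈ adj, ∀ x ∈ l, PySem.Raise.InRange adj.length x := by
    intro l hl x hx
    rcases hmem l hl x hx with ⟨l0, hl0, hxl0⟩ | ⟨p, hp, hxp⟩
    · obtain ⟨a, _, rfl⟩ := List.mem_map.mp hl0
      exact absurd hxl0 (List.not_mem_nil)
    · obtain ⟨⟨h1, h2⟩, ⟨h3, h4⟩⟩ := hedges p hp
      unfold PySem.Raise.InRange
      rcases hxp with rfl | rfl <;> omega
  have hlE : ∀ l ∈ adj, l.length ≤ 2 * edges.length := by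
    intro l hl
    have h0 : ∀ l0 ∈ (PySem.List.pyRange 0 n 1).map (fun _ => ([] : List Int)),
        l0.length ≤ 0 := by
      intro l0 hl0
      obtain ⟨a, _, rfl⟩ := List.mem_map.mp hl0
      simp
    have := hlens 0 h0 l hl
    omega
  have hIR0 : PySem.Raise.InRange adj.length 0 := by
    unfold PySem.Raise.InRange
    omega
  obtain ⟨b, v', hdfs, _, _, _⟩ := pvSuff adj Hadj (2 * adj.length + 2) 0 (-1)
    PySem.Set.empty (by simp [PySem.Set.empty]) (by simp [PySem.Set.empty]) hIR0
    (by rw [pvEmptyAdd0]; omega)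
  obtain ⟨l0, hget0⟩ := pvGet_some_of_inRange adj 0 hIR0
  have hfe : 2 * adj.length + 2 = (2 * adj.length + 1) + 1 := by omega
  rw [hfe] at hdfs
  have hloop : pvDfsLoop (2 * adj.length + 1) adj 0 (-1) l0
      (PySem.Set.add PySem.Set.empty 0) = some (b, v') := by
    simpa [pvDfs, hget0] using hdfs
  obtain ⟨d, hbd0, ht, hf⟩ := pvMain adj n (2 * adj.length + 1) l0 0 (-1)
    (PySem.Set.add PySem.Set.empty 0) (b, v') hloop
  have hbd : d + pvS adj v' ≤ l0.length + 1 + pvS adj (PySem.Set.add PySem.Set.empty 0) := hbd0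
  have hS0 : pvS adj (PySem.Set.add PySem.Set.empty 0) ≤
      2 * adj.length * (2 * edges.length + 1) := pvS_le adj _ _ hlE
  have hl0len : l0.length ≤ 2 * edges.length :=
    hlE l0 (PySem.List.mem_of_pyGet?_eq_some adj hget0)
  have hexp1 : 2 * adj.length * (2 * edges.length + 1)
      = 4 * (adj.length * edges.length) + 2 * adj.length := by ring
  have hexp2 : (2 * adj.length + 2) * (2 * edges.length + 2) + 8
      = 4 * (adj.length * edges.length) + 4 * adj.length + 4 * edges.length + 12 := by ring
  have hdF : d + 2 ≤ (2 * adj.length + 2) * (2 * edges.length + 2) + 8 := by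
    rw [hexp2]
    rw [hexp1] at hS0
    omega
  -- reduce both ports
  show checkgraph edges n m = checkgraph_alt edges n m
  have hred :
      checkgraph edges n m
        = (match pvDfs (2 * adj.length + 2) adj 0 (-1) PySem.Set.empty with
            | none => false
            | some (b, visited) => if b then decide ((visited.length : Int) = n) else false)
      ∧ checkgraph_alt edges n m
        = (match PySem.List.pyGet? adj 0 with
            | none => false
            | some l0 =>
              (pvRun ((2 * adj.length + 2) * (2 * edges.length + 2) + 8) n adj
                [(0, -1, l0)] (PySem.Set.add PySem.Set.empty 0)).getD false) := by
    constructor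
    · show (match pvBuildAdj edges ((PySem.List.pyRange 0 n 1).map (fun _ => ([] : List Int))) with
            | none => false
            | some adj =>
              match pvDfs (2 * adj.length + 2) adj 0 (-1) PySem.Set.empty with
              | none => false
              | some (b, visited) => if b then decide ((visited.length : Int) = n) else false) = _
      rw [hbuild]
    · show (match pvBuildAdj edges ((PySem.List.pyRange 0 n 1).map (fun _ => ([] : List Int))) with
            | none => false
            | some adj =>
              match PySem.List.pyGet? adj 0 with
              | none => false
              | some l0 =>
                (pvRun ((2 * adj.length + 2) * (2 * edges.length + 2) + 8) n adj
                  [(0, -1, l0)] (PySem.Set.add PySem.Set.empty 0)).getD false) = _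
      rw [hbuild]
  have hdfs2 : pvDfs (2 * adj.length + 2) adj 0 (-1) PySem.Set.empty = some (b, v') := by
    rw [hfe]; exact hdfs
  rw [hred.1, hred.2, hdfs2, hget0]
  cases b with
  | true =>
    have hrun := ht rfl [] (((2 * adj.length + 2) * (2 * edges.length + 2) + 8) - d)
    have harith : (((2 * adj.length + 2) * (2 * edges.length + 2) + 8) - d) + d
        = (2 * adj.length + 2) * (2 * edges.length + 2) + 8 := by omega
    rw [harith] at hrun
    obtain ⟨k, hk⟩ : ∃ k, ((2 * adj.length + 2) * (2 * edges.length + 2) + 8) - d = k + 1 :=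
      ⟨((2 * adj.length + 2) * (2 * edges.length + 2) + 8) - d - 1, by omega⟩
    show (decide ((v'.length : Int) = n))
        = (pvRun ((2 * adj.length + 2) * (2 * edges.length + 2) + 8) n adj
            [(0, -1, l0)] (PySem.Set.add PySem.Set.empty 0)).getD false
    rw [hrun, hk]
    simp [pvRun]
  | false =>
    have hrun := hf rfl [] (((2 * adj.length + 2) * (2 * edges.length + 2) + 8) - d - 1)
    have harith : (((2 * adj.length + 2) * (2 * edges.length + 2) + 8) - d - 1) + d + 1
        = (2 * adj.length + 2) * (2 * edges.length + 2) + 8 := by omega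
    rw [harith] at hrun
    show false
        = (pvRun ((2 * adj.length + 2) * (2 * edges.length + 2) + 8) n adj
            [(0, -1, l0)] (PySem.Set.add PySem.Set.empty 0)).getD false
    rw [hrun]
    simp
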